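-- pv_equiv track=rewrite | github.com/bsherrill480/lazyJavaTests | makeTests.py | compress_into_single_java_lines
-- ===== SOURCE A (Python) =====
-- def compress_into_single_java_lines(lines):
--     compressed_lines = []
--     line_accumulator = ""
--     for line in lines:
--         line = line.strip()
--         line_accumulator += line
--         if len(line) >= 2 and line[-1] == ";" or line[0:2] == "//":
--             compressed_lines.append(line_accumulator)
--             line_accumulator = ""
--     return compressed_lines
-- ===== SOURCE B (Python) =====
-- def _is_flush(s):
--     # exact condition of the task: (len >= 2 and ends with ';') or starts with '//'
--     return (len(s) >= 2 and s[-1] == ";") or s[0:2] == "//"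
--
--
-- def _split_at_flush(xs):
--     """Split xs into (prefix before first flush line, rest starting at it)."""
--     for j, s in enumerate(xs):
--         if _is_flush(s):
--             return xs[:j], xs[j:]
--     return xs, []
--
--
-- def compress_into_single_java_lines(lines):
--     stripped = [l.strip() for l in lines]
--     out = []
--     while True:
--         pre, rest = _split_at_flush(stripped)
--         if not rest:
--             return out
--         out.append("".join(pre) + rest[0])
--         stripped = rest[1:]
-- ===== Notes on version B (the rewrite author's own statement) =====
-- stated objective: alternative
-- what changed: Replaces A's single fold with a mutable string accumulator by a two-phase scheme: strip all lines once, then repeatedly split the list at the next flush line and join each group at once.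
import Mathlib
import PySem

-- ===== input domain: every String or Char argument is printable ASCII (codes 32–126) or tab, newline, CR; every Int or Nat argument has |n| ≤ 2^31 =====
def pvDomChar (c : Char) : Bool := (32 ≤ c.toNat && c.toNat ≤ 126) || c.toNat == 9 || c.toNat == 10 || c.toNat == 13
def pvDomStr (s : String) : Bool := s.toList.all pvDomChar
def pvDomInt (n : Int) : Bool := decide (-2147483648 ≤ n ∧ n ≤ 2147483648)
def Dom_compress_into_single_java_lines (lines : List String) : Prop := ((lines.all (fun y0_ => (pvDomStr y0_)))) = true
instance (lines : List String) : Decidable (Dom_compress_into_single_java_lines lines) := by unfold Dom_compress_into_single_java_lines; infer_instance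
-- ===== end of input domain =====

-- B splits the stripped list at flush lines and joins each group at once, instead of A's
-- character accumulator fold; same cost, different decomposition ("alternative").

-- shared flush test: (len(line) >= 2 and line[-1] == ';') or line[0:2] == '//'
def pvFlush (l : List Char) : Bool :=
  (decide (2 ≤ l.length) && (PySem.List.pyGet? l (-1) == some ';'))
    || (PySem.List.slice l (some 0) (some 2) == ['/', '/'])

-- ===== PORT A =====
def compress_into_single_java_lines (lines : List String) : List String :=
  (lines.foldl
    (fun (st : List String × List Char) s =>
      let line := PySem.Chars.strip s.toList
      let acc := st.2 ++ line
      if pvFlush line then (st.1 ++ [String.ofList acc], []) else (st.1, acc))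
    ([], [])).1

-- ===== PORT B =====
-- Source B's _split_at_flush: scan for the first flush line, return (prefix, rest)
def pvSplitAtFlush : List (List Char) → List (List Char) × List (List Char)
  | [] => ([], [])
  | x :: xs =>
      if pvFlush x then ([], x :: xs)
      else
        let p := pvSplitAtFlush xs
        (x :: p.1, p.2)

theorem pvSplitAtFlush_append (l : List (List Char)) :
    (pvSplitAtFlush l).1 ++ (pvSplitAtFlush l).2 = l := by
  induction l with
  | nil => rfl
  | cons x xs ih =>
      simp only [pvSplitAtFlush]
      split
      · rfl
      · simpa using ih

-- Source B's while loop: emit one joined group per split, recurse on the remainder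
def pvGroups (l : List (List Char)) : List String :=
  match h : pvSplitAtFlush l with
  | (_, []) => []
  | (pre, y :: ys) => String.ofList (pre.flatten ++ y) :: pvGroups ys
termination_by l.length
decreasing_by
  have := pvSplitAtFlush_append l
  rw [h] at this
  have : l.length = pre.length + (ys.length + 1) := by
    rw [← this]; simp
  omega

def compress_into_single_java_lines_alt (lines : List String) : List String :=
  pvGroups (lines.map (fun s => PySem.Chars.strip s.toList))

-- ===== PRECONDITION & SPEC =====
def Spec_compress_into_single_java_lines (lines : List String) (out : List String) : Prop := out = compress_into_single_java_lines_alt lines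
instance (lines : List String) (out : List String) : Decidable (Spec_compress_into_single_java_lines lines out) := by unfold Spec_compress_into_single_java_lines; infer_instance

-- ===== CLAIM (what is proved, stated in full; the proofs are below) =====
def Claim_equal_compress_into_single_java_lines : Prop := ∀ (lines : List String), Dom_compress_into_single_java_lines lines → Spec_compress_into_single_java_lines lines (compress_into_single_java_lines lines)

-- ===== LEMMAS AND PROOFS =====

-- A's fold, on the already-stripped lines, with explicit accumulator
def pvFaux : List (List Char) → List Char → List String
  | [], _ => []
  | x :: xs, acc =>
      if pvFlush x then String.ofList (acc ++ x) :: pvFaux xs [] else pvFaux xs (acc ++ x)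

theorem foldl_eq_pvFaux (ls : List String) (out : List String) (acc : List Char) :
    (ls.foldl
      (fun (st : List String × List Char) s =>
        let line := PySem.Chars.strip s.toList
        let acc := st.2 ++ line
        if pvFlush line then (st.1 ++ [String.ofList acc], []) else (st.1, acc))
      (out, acc)).1
    = out ++ pvFaux (ls.map (fun s => PySem.Chars.strip s.toList)) acc := by
  induction ls generalizing out acc with
  | nil => simp [pvFaux]
  | cons s rest ih =>
      simp only [List.foldl_cons, List.map_cons, pvFaux]
      split
      · rw [ih]; simp
      · rw [ih]

theorem pvFaux_span (s : List (List Char)) (acc : List Char) :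
    pvFaux s acc =
      match pvSplitAtFlush s with
      | (_, []) => []
      | (pre, y :: ys) => String.ofList (acc ++ pre.flatten ++ y) :: pvFaux ys [] := by
  induction s generalizing acc with
  | nil => rfl
  | cons x xs ih =>
      simp only [pvFaux, pvSplitAtFlush]
      by_cases h : pvFlush x
      · simp [h]
      · simp only [h, if_neg, Bool.false_eq_true, not_false_iff]
        rw [ih (acc ++ x)]
        rcases hs : pvSplitAtFlush xs with ⟨pre, rest⟩
        cases rest with
        | nil => simp
        | cons y ys => simp [List.append_assoc]

theorem pvGroups_eq_pvFaux : ∀ (n : Nat) (s : List (List Char)), s.length ≤ n →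
    pvGroups s = pvFaux s [] := by
  intro n
  induction n with
  | zero =>
      intro s hs
      have : s = [] := by cases s <;> simp_all
      subst this; simp [pvGroups, pvSplitAtFlush, pvFaux]
  | succ n ih =>
      intro s hs
      rw [pvFaux_span]
      rw [pvGroups]
      rcases h : pvSplitAtFlush s with ⟨pre, rest⟩
      cases rest with
      | nil => rfl
      | cons y ys =>
          have hlen := pvSplitAtFlush_append s
          rw [h] at hlen
          have hys : ys.length ≤ n := by
            have : s.length = pre.length + (ys.length + 1) := by rw [← hlen]; simp
            omega
          simp [ih ys hys]

-- ===== VERDICT (by name: the statement is the Claim_ definition above) =====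
theorem compress_into_single_java_lines_spec : Claim_equal_compress_into_single_java_lines := by
  intro lines _
  unfold Spec_compress_into_single_java_lines compress_into_single_java_lines
    compress_into_single_java_lines_alt
  rw [foldl_eq_pvFaux lines [] [],
    pvGroups_eq_pvFaux (lines.map (fun s => PySem.Chars.strip s.toList)).length _ le_rfl]
  simp
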